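-- pv_equiv track=rewrite | github.com/Prestipino/pyXRD | pyXRD/database.py | _short_notation
-- ===== SOURCE A (Python) =====
-- def _short_notation(comb):
--     """for mod_list class
--     """
--     out = []
--     for iter_c in comb:
--         stringa = []
--         iter_cset = set(iter_c)
--         for site in iter_cset:
--             site_c = iter_c.count(site)
--             stringa.append('%s%d' % (site, site_c))
--         stringa.sort()
--         out.append(stringa)
--     return out
-- ===== SOURCE B (Python) =====
-- def _short_notation(comb):
--     """for mod_list class
--     """
--     out = []
--     for iter_c in comb:
--         stringa = []
--         cur = ''
--         cnt = 0
--         for x in sorted(iter_c):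
--             if cnt > 0 and x == cur:
--                 cnt += 1
--             else:
--                 if cnt > 0:
--                     stringa.append('%s%d' % (cur, cnt))
--                 cur = x
--                 cnt = 1
--         if cnt > 0:
--             stringa.append('%s%d' % (cur, cnt))
--         stringa.sort()
--         out.append(stringa)
--     return out
-- ===== Notes on version B (the rewrite author's own statement) =====
-- stated objective: faster
-- what changed: B sorts each sublist and builds the count strings in one grouping pass over consecutive equal elements, instead of A's set of distinct elements with a full list.count scan per distinct element.
import Mathlib
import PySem

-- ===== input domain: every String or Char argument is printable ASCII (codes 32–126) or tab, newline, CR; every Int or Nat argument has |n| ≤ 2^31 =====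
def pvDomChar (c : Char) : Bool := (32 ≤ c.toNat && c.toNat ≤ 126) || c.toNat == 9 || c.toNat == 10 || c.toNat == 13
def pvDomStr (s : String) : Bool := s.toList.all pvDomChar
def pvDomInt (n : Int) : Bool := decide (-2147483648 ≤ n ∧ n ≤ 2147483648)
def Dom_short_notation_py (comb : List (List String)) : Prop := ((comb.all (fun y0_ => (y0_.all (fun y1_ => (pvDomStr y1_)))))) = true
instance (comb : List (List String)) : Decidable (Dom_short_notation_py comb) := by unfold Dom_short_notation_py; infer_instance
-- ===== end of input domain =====

-- B replaces A's set + per-element list.count inner scan (O(n*d) per sublist) by one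
-- grouping pass over the sorted sublist (O(n log n)); a timing run measured B faster.

-- ===== PORT A =====
-- The Python iterates a set only to build a list that is immediately sorted, so the
-- result does not depend on the set's (hash) iteration order; iterating the PySem.Set
-- list here is therefore exact.
def short_notation_py (comb : List (List String)) : List (List String) :=
  comb.foldl (fun out iter_c =>
    let iter_cset : PySem.Set String := PySem.Set.ofList iter_c
    let stringa : List String :=
      iter_cset.foldl (fun stringa site =>
        stringa ++ [site ++ PySem.Int.toStr ((PySem.List.count iter_c site : Nat) : Int)]) []
    out ++ [PySem.List.sorted stringa (fun x => x)]) []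

-- ===== PORT B =====
-- loop state (cur, cnt, stringa) of Source B's single grouping pass
def pvStepB (st : String × Int × List String) (x : String) : String × Int × List String :=
  if 0 < st.2.1 ∧ x = st.1 then (st.1, st.2.1 + 1, st.2.2)
  else (x, 1, if 0 < st.2.1 then st.2.2 ++ [st.1 ++ PySem.Int.toStr st.2.1] else st.2.2)

-- the trailing 'if cnt > 0: stringa.append(...)' after the loop
def pvFlushB (st : String × Int × List String) : List String :=
  if 0 < st.2.1 then st.2.2 ++ [st.1 ++ PySem.Int.toStr st.2.1] else st.2.2

def short_notation_py_alt (comb : List (List String)) : List (List String) :=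
  comb.foldl (fun out iter_c =>
    let stringa := pvFlushB ((PySem.List.sorted iter_c (fun x => x)).foldl pvStepB ("", 0, []))
    out ++ [PySem.List.sorted stringa (fun x => x)]) []

-- ===== PRECONDITION & SPEC =====
def Spec_short_notation_py (comb : List (List String)) (out : List (List String)) : Prop := out = short_notation_py_alt comb
instance (comb : List (List String)) (out : List (List String)) : Decidable (Spec_short_notation_py comb out) := by unfold Spec_short_notation_py; infer_instance

-- ===== CLAIM (what is proved, stated in full; the proofs are below) =====
def Claim_equal_short_notation_py : Prop := ∀ (comb : List (List String)), Dom_short_notation_py comb → Spec_short_notation_py comb (short_notation_py comb)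

-- ===== LEMMAS AND PROOFS =====

-- run-length grouping of a list, given a current element c seen k times
def pvRuns (c : String) (k : Int) : List String → List String
  | [] => [c ++ PySem.Int.toStr k]
  | x :: xs => if x = c then pvRuns c (k + 1) xs else (c ++ PySem.Int.toStr k) :: pvRuns x 1 xs

-- first-occurrence dedup
def pvUniq : List String → List String
  | [] => []
  | x :: xs => x :: (pvUniq xs).filter (fun e => e ≠ x)

theorem pv_mem_uniq (e : String) (l : List String) : e ∈ pvUniq l ↔ e ∈ l := by
  induction l with
  | nil => simp [pvUniq]
  | cons x xs ih =>
    by_cases hex : e = x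
    · simp [pvUniq, hex]
    · simp [pvUniq, List.mem_filter, hex, ih]

theorem pv_nodup_uniq (l : List String) : (pvUniq l).Nodup := by
  induction l with
  | nil => simp [pvUniq]
  | cons x xs ih =>
    refine List.Nodup.cons ?_ (ih.filter _)
    intro hx
    simp [List.mem_filter] at hx

theorem pv_fold_runs (s : List String) : ∀ (c : String) (k : Int) (acc : List String),
    0 < k → pvFlushB (s.foldl pvStepB (c, k, acc)) = acc ++ pvRuns c k s := by
  induction s with
  | nil =>
    intro c k acc hk
    simp [pvFlushB, pvRuns, hk]
  | cons x xs ih =>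
    intro c k acc hk
    by_cases hx : x = c
    · subst hx
      rw [show (x :: xs).foldl pvStepB (x, k, acc) = xs.foldl pvStepB (x, k + 1, acc) from by
        simp [pvStepB, hk]]
      rw [ih x (k + 1) acc (by omega)]
      simp [pvRuns]
    · rw [show (x :: xs).foldl pvStepB (c, k, acc) = xs.foldl pvStepB (x, 1, acc ++ [c ++ PySem.Int.toStr k]) from by
        simp [pvStepB, hx, hk]]
      rw [ih x 1 _ (by omega)]
      simp [pvRuns, hx]

theorem pv_runs_eq (s : List String) : ∀ (c : String) (k : Int),
    s.Pairwise (· ≤ ·) → (∀ x ∈ s, c ≤ x) →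
    pvRuns c k s = (c ++ PySem.Int.toStr (k + ((PySem.List.count s c : Nat) : Int)))
      :: ((pvUniq s).filter (fun e => e ≠ c)).map (fun e => e ++ PySem.Int.toStr ((PySem.List.count s e : Nat) : Int)) := by
  induction s with
  | nil =>
    intro c k _ _
    simp [pvRuns, pvUniq, PySem.List.count]
  | cons x xs ih =>
    intro c k hp hc
    have hp' : xs.Pairwise (· ≤ ·) := hp.tail
    by_cases hx : x = c
    · subst hx
      have hcx : ∀ y ∈ xs, x ≤ y := fun y hy => (List.pairwise_cons.mp hp).1 y hy
      rw [show pvRuns x k (x :: xs) = pvRuns x (k + 1) xs from by simp [pvRuns]]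
      rw [ih x (k + 1) hp' hcx]
      have h2 : k + 1 + ((PySem.List.count xs x : Nat) : Int) = k + ((PySem.List.count (x :: xs) x : Nat) : Int) := by
        simp [PySem.List.count]; ring
      rw [h2]
      have huq : (pvUniq (x :: xs)).filter (fun e => e ≠ x) = (pvUniq xs).filter (fun e => e ≠ x) := by
        simp [pvUniq, List.filter_filter]
      rw [huq]
      congr 1
      apply List.map_congr_left
      intro e he
      have hex : e ≠ x := by
        rcases List.mem_filter.mp he with ⟨_, h⟩
        simpa using h
      have : PySem.List.count (x :: xs) e = PySem.List.count xs e := by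
        simp [PySem.List.count, Ne.symm hex]
      rw [this]
    · -- x ≠ c : c's run ends here, and c does not occur in x :: xs at all
      have hcx : c ≤ x := hc x (List.mem_cons_self ..)
      have hxs : ∀ y ∈ xs, x ≤ y := fun y hy => (List.pairwise_cons.mp hp).1 y hy
      have hcnot : c ∉ x :: xs := by
        intro hmem
        rcases List.mem_cons.mp hmem with h | h
        · exact hx h.symm
        · exact hx (le_antisymm (hxs c h) hcx)
      simp only [pvRuns, if_neg hx]
      rw [ih x 1 hp' hxs]
      have hcount0 : PySem.List.count (x :: xs) c = 0 := by
        simp only [PySem.List.count]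
        exact List.count_eq_zero.mpr hcnot
      have hhead : k + ((PySem.List.count (x :: xs) c : Nat) : Int) = k := by
        rw [hcount0]; simp
      rw [hhead]
      have hfil : (pvUniq (x :: xs)).filter (fun e => e ≠ c) = pvUniq (x :: xs) := by
        apply List.filter_eq_self.mpr
        intro e he
        have hmem : e ∈ x :: xs := (pv_mem_uniq e (x :: xs)).mp he
        have : e ≠ c := fun h => hcnot (h ▸ hmem)
        simpa using this
      rw [hfil]
      rw [show pvUniq (x :: xs) = x :: (pvUniq xs).filter (fun e => e ≠ x) from rfl]
      simp only [List.map_cons]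
      rw [show (1 : Int) + ((PySem.List.count xs x : Nat) : Int) = ((PySem.List.count (x :: xs) x : Nat) : Int) from by
        simp [PySem.List.count]; ring]
      congr 1
      congr 1
      apply List.map_congr_left
      intro e he
      have hex : e ≠ x := by
        rcases List.mem_filter.mp he with ⟨_, h⟩
        simpa using h
      have : PySem.List.count (x :: xs) e = PySem.List.count xs e := by
        simp [PySem.List.count, Ne.symm hex]
      rw [this]

-- per-sublist equality: A's sorted set-count strings = B's sorted grouped strings
theorem pv_per_list (iter_c : List String) :
    PySem.List.sorted ((PySem.Set.ofList iter_c).foldl (fun stringa site =>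
        stringa ++ [site ++ PySem.Int.toStr ((PySem.List.count iter_c site : Nat) : Int)]) []) (fun x => x)
    = PySem.List.sorted (pvFlushB ((PySem.List.sorted iter_c (fun x => x)).foldl pvStepB ("", 0, []))) (fun x => x) := by
  rw [PySem.List.foldl_append_singleton_eq_map
    (f := fun site => site ++ PySem.Int.toStr ((PySem.List.count iter_c site : Nat) : Int))
    (l := PySem.Set.ofList iter_c) (acc := [])]
  rcases hs : PySem.List.sorted iter_c (fun x => x) with _ | ⟨x, rest⟩
  · have : iter_c = [] := (PySem.List.sorted_eq_nil_iff iter_c (fun x => x) false).mp hs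
    subst this
    rfl
  · -- B side: the first step starts a run, then pv_fold_runs describes the rest of the pass
    have hb : pvFlushB ((x :: rest).foldl pvStepB ("", 0, [])) = pvRuns x 1 rest := by
      have h0 : pvStepB ("", 0, []) x = (x, 1, []) := by simp [pvStepB]
      rw [List.foldl_cons, h0, pv_fold_runs rest x 1 [] (by omega)]
      rfl
    rw [hb]
    have hpair : (x :: rest).Pairwise (· ≤ ·) := by
      have := PySem.List.sorted_pairwise iter_c (fun x => x)
      rwa [hs] at this
    have hxr : ∀ y ∈ rest, x ≤ y := fun y hy => (List.pairwise_cons.mp hpair).1 y hy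
    rw [pv_runs_eq rest x 1 hpair.tail hxr]
    have hperm : (x :: rest).Perm iter_c := by
      have := PySem.List.sorted_perm iter_c (fun x => x) false
      rwa [hs] at this
    have hcnt : ∀ e, PySem.List.count (x :: rest) e = PySem.List.count iter_c e := by
      intro e
      simp only [PySem.List.count]
      exact hperm.count_eq e
    -- B's grouped strings are exactly the formatted dedup of the sorted list, with counts in iter_c
    have hrw : (x ++ PySem.Int.toStr (1 + ((PySem.List.count rest x : Nat) : Int)))
        :: ((pvUniq rest).filter (fun e => e ≠ x)).map (fun e => e ++ PySem.Int.toStr ((PySem.List.count rest e : Nat) : Int))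
        = (pvUniq (x :: rest)).map (fun e => e ++ PySem.Int.toStr ((PySem.List.count iter_c e : Nat) : Int)) := by
      rw [show pvUniq (x :: rest) = x :: (pvUniq rest).filter (fun e => e ≠ x) from rfl]
      simp only [List.map_cons]
      congr 1
      · rw [show (1 : Int) + ((PySem.List.count rest x : Nat) : Int) = ((PySem.List.count (x :: rest) x : Nat) : Int) from by
          simp [PySem.List.count]; ring]
        rw [hcnt x]
      · apply List.map_congr_left
        intro e he
        have hex : e ≠ x := by
          rcases List.mem_filter.mp he with ⟨_, h⟩
          simpa using h
        rw [show PySem.List.count rest e = PySem.List.count (x :: rest) e from by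
          simp [PySem.List.count, Ne.symm hex]]
        rw [hcnt e]
    rw [hrw]
    -- both sides sort permuted lists of the same formatted strings
    apply PySem.List.sorted_eq_sorted_of_perm _ _ (fun x => x) (fun _ _ h => h)
    apply List.Perm.map
    rw [List.perm_ext_iff_of_nodup (PySem.Set.nodup_ofList iter_c) (pv_nodup_uniq (x :: rest))]
    intro e
    rw [PySem.Set.mem_ofList, pv_mem_uniq]
    exact ⟨fun h => hperm.mem_iff.mpr h, fun h => hperm.mem_iff.mp h⟩

theorem pv_outer (comb : List (List String)) : ∀ (acc : List (List String)),
    comb.foldl (fun out iter_c =>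
      out ++ [PySem.List.sorted ((PySem.Set.ofList iter_c).foldl (fun stringa site =>
        stringa ++ [site ++ PySem.Int.toStr ((PySem.List.count iter_c site : Nat) : Int)]) []) (fun x => x)]) acc
    = comb.foldl (fun out iter_c =>
      out ++ [PySem.List.sorted (pvFlushB ((PySem.List.sorted iter_c (fun x => x)).foldl pvStepB ("", 0, []))) (fun x => x)]) acc := by
  induction comb with
  | nil => intro acc; rfl
  | cons c cs ih =>
    intro acc
    simp only [List.foldl_cons]
    rw [pv_per_list c, ih]

-- ===== VERDICT (by name: the statement is the Claim_ definition above) =====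
theorem short_notation_py_spec : Claim_equal_short_notation_py := by
  intro comb _
  show short_notation_py comb = short_notation_py_alt comb
  unfold short_notation_py short_notation_py_alt
  exact pv_outer comb []
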